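-- pv_equiv track=rewrite | github.com/jail238/judge_template | graph/degree_sequence/Erdős–Gallai/Erdős–Gallai.py | is_graphical
-- ===== SOURCE A (Python) =====
-- def is_graphical(a):
--     a.sort(reverse=True)
--     n = len(a)
--     presum = [0 for _ in range(n+1)]
--     for i in range(n): presum[i+1] = presum[i]+a[i]
--     if presum[-1]&1: return 0
--     p = n
--     for k in range(1, n+1):
--         if p<k: p=k
--         while p>k and a[p-1]<k: p -= 1
--         if presum[k] > k*(k-1)+k*(p-k)+(presum[n]-presum[p]): return 0
--     return 1
-- ===== SOURCE B (Python) =====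
-- def is_graphical(a):
--     # same in-place descending sort mutation as the original
--     a.sort(reverse=True)
--     n = len(a)
--     if sum(a) % 2:
--         return 0
--     for k in range(1, n + 1):
--         lhs = sum(a[:k])
--         rhs = k * (k - 1)
--         for x in a[k:]:
--             rhs += x if x < k else k
--         if lhs > rhs:
--             return 0
--     return 1
-- ===== Notes on version B (the rewrite author's own statement) =====
-- stated objective: simpler
-- what changed: Replaces the prefix-sum array and the stateful two-pointer min-sum with a plain per-k rescan: lhs = sum of the first k degrees, rhs = k*(k-1) plus a direct inner loop summing min(x,k) over the tail; parity is checked on sum(a).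
import Mathlib
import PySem

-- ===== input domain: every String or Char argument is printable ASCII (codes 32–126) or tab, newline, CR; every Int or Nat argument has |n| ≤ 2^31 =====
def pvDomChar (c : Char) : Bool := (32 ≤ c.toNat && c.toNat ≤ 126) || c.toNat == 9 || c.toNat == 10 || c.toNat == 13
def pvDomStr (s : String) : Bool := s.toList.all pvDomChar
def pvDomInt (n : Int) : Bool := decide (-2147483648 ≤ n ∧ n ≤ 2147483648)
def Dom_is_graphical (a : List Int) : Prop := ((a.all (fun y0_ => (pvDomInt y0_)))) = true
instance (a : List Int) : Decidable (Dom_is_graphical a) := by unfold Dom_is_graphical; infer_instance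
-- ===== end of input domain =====

-- B replaces A's prefix-sum array and stateful two-pointer with a plain per-k rescan (simpler);
-- both Pythons sort the argument in place identically; the equivalence proved is about the return value.

-- ===== PORT A =====
-- the Python loop 'presum[i+1] = presum[i] + a[i]': cumulative sums with running accumulator c
def presums (c : Int) : List Int → List Int
  | [] => []
  | x :: xs => (c + x) :: presums (c + x) xs

-- the while loop 'while p>k and a[p-1]<k: p -= 1' (index p-1 is always in range when taken)
def shrinkP (s : List Int) (k p : Nat) : Nat :=
  if _h : k < p ∧ s.getD (p - 1) 0 < (k : Int) then shrinkP s k (p - 1) else p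
termination_by p
decreasing_by omega

-- 'for k in range(1, n+1)' carrying the pointer p, with early return 0
def loopA (s presum : List Int) (n k p : Nat) : Int :=
  if k ≤ n then
    let p1 := if p < k then k else p
    let p2 := shrinkP s k p1
    if presum.getD k 0 >
        (k : Int) * ((k : Int) - 1) + (k : Int) * ((p2 : Int) - (k : Int))
          + (presum.getD n 0 - presum.getD p2 0) then 0
    else loopA s presum n (k + 1) p2
  else 1
termination_by n + 1 - k

def is_graphical (a : List Int) : Int :=
  let s := PySem.List.sorted a (fun x => x) true
  let n := s.length
  let presum := 0 :: presums 0 s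
  if PySem.Int.band (presum.getD n 0) 1 ≠ 0 then 0 else loopA s presum n 1 n

-- ===== PORT B =====
-- 'for k in range(1, n+1)': lhs = sum(a[:k]); rhs = k*(k-1) plus the inner loop over a[k:]
def loopB (s : List Int) (n k : Nat) : Int :=
  if k ≤ n then
    if (s.take k).sum >
        (s.drop k).foldl (fun r x => r + (if x < (k : Int) then x else (k : Int)))
          ((k : Int) * ((k : Int) - 1)) then 0
    else loopB s n (k + 1)
  else 1
termination_by n + 1 - k

def is_graphical_alt (a : List Int) : Int :=
  let s := PySem.List.sorted a (fun x => x) true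
  if PySem.Int.mod s.sum 2 ≠ 0 then 0 else loopB s s.length 1

-- ===== PRECONDITION & SPEC =====
def Spec_is_graphical (a : List Int) (out : Int) : Prop := out = is_graphical_alt a
instance (a : List Int) (out : Int) : Decidable (Spec_is_graphical a out) := by unfold Spec_is_graphical; infer_instance

-- ===== CLAIM (what is proved, stated in full; the proofs are below) =====
def Claim_equal_is_graphical : Prop := ∀ (a : List Int), Dom_is_graphical a → Spec_is_graphical a (is_graphical a)

-- ===== LEMMAS AND PROOFS =====

-- the prefix-sum array A builds holds the partial sums
lemma presum_getD (s : List Int) (c : Int) (k : Nat) (hk : k ≤ s.length) :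
    (c :: presums c s).getD k 0 = c + (s.take k).sum := by
  induction s generalizing c k with
  | nil =>
      have hk0 : k = 0 := Nat.le_zero.mp (by simpa using hk)
      subst hk0; simp
  | cons x xs ih =>
      cases k with
      | zero => simp
      | succ j =>
          have hj : j ≤ xs.length := by simpa using hk
          simp only [presums, List.getD_cons_succ, List.take_succ_cons, List.sum_cons]
          rw [ih (c + x) j hj]; ring

-- specification of the while loop
lemma shrink_spec (s : List Int) (k p : Nat) (hk : 1 ≤ k) (hkp : k ≤ p) (hpn : p ≤ s.length)
    (hinv : ∀ i, p ≤ i → (hi : i < s.length) → s[i] < (k : Int)) :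
    k ≤ shrinkP s k p ∧ shrinkP s k p ≤ p ∧
      (∀ i, shrinkP s k p ≤ i → (hi : i < s.length) → s[i] < (k : Int)) ∧
      (shrinkP s k p = k ∨ ¬ (s.getD (shrinkP s k p - 1) 0 < (k : Int))) := by
  induction p using Nat.strong_induction_on with
  | _ p ih =>
      rw [shrinkP]
      split
      · next h =>
        obtain ⟨hkp', hlt⟩ := h
        have h1 : k ≤ p - 1 := by omega
        have h2 : p - 1 ≤ s.length := by omega
        have hpm : p - 1 < s.length := by omega
        have hinv' : ∀ i, p - 1 ≤ i → (hi : i < s.length) → s[i] < (k : Int) := by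
          intro i hi1 hi2
          rcases Nat.lt_or_ge i p with hip | hip
          · have : i = p - 1 := by omega
            subst this
            rwa [List.getD_eq_getElem s 0 hpm] at hlt
          · exact hinv i hip hi2
        have := ih (p - 1) (by omega) h1 h2 hinv'
        exact ⟨this.1, by omega, this.2.2.1, this.2.2.2⟩
      · next h =>
        refine ⟨hkp, le_refl _, hinv, ?_⟩
        by_cases hq : k < p
        · right; intro hc; exact h ⟨hq, hc⟩
        · left; omega

-- the two-pointer value equals the direct min-sum
lemma minsum_split (s : List Int) (k q : Nat)
    (hkq : k ≤ q) (hqn : q ≤ s.length)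
    (hup : ∀ i, k ≤ i → i < q → (hi : i < s.length) → (k : Int) ≤ s[i])
    (hlo : ∀ i, q ≤ i → (hi : i < s.length) → s[i] < (k : Int)) :
    ((s.drop k).map (fun x => if x < (k : Int) then x else (k : Int))).sum
      = (k : Int) * ((q : Int) - (k : Int)) + (s.drop q).sum := by
  have hsplit : s.drop k = (s.drop k).take (q - k) ++ s.drop q := by
    have hdd : (s.drop k).drop (q - k) = s.drop q := by
      rw [List.drop_drop]; congr 1; omega
    rw [← hdd]
    exact (List.take_append_drop _ _).symm
  rw [hsplit, List.map_append, List.sum_append]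
  have hmidlen : ((s.drop k).take (q - k)).length = q - k := by
    simp [List.length_take, List.length_drop]; omega
  have hmid : ((s.drop k).take (q - k)).map (fun x => if x < (k : Int) then x else (k : Int))
      = ((s.drop k).take (q - k)).map (fun _ => (k : Int)) := by
    apply List.map_congr_left
    intro x hx
    obtain ⟨j, hj, hxe⟩ := List.mem_iff_getElem.mp hx
    have hj' : j < q - k := by omega
    have hidx : k + j < s.length := by omega
    have : x = s[k + j] := by
      rw [← hxe]
      simp [List.getElem_take, List.getElem_drop]
    have hge : (k : Int) ≤ x := by
      rw [this]; exact hup (k + j) (by omega) (by omega) hidx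
    simp [not_lt.mpr hge]
  rw [hmid]
  have htail : (s.drop q).map (fun x => if x < (k : Int) then x else (k : Int)) = s.drop q := by
    conv_rhs => rw [← List.map_id (s.drop q)]
    apply List.map_congr_left
    intro x hx
    obtain ⟨j, hj, hxe⟩ := List.mem_iff_getElem.mp hx
    have hidx : q + j < s.length := by
      have := hj; simp [List.length_drop] at this; omega
    have : x = s[q + j] := by rw [← hxe]; simp [List.getElem_drop]
    have := hlo (q + j) (by omega) hidx
    rw [‹x = s[q + j]›]
    simp [this]
  rw [htail, PySem.List.sum_map_const_int, hmidlen]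
  push_cast [Nat.cast_sub hkq]
  ring

-- the two loops agree under the pointer invariant
lemma loop_eq (s : List Int) (hs : s.Pairwise (fun a b => b ≤ a)) :
    ∀ d k p, s.length + 1 - k = d → 1 ≤ k → p ≤ s.length →
      (∀ i, p ≤ i → (hi : i < s.length) → s[i] < (k : Int)) →
      loopA s (0 :: presums 0 s) s.length k p = loopB s s.length k := by
  intro d
  induction d with
  | zero =>
      intro k p hd hk hpn hinv
      rw [loopA, loopB]
      have : ¬ (k ≤ s.length) := by omega
      simp [this]
  | succ d ih =>
      intro k p hd hk hpn hinv
      rw [loopA, loopB]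
      by_cases hkn : k ≤ s.length
      · simp only [hkn, if_true]
        set p1 := if p < k then k else p with hp1
        have hkp1 : k ≤ p1 := by rw [hp1]; split <;> omega
        have hp1n : p1 ≤ s.length := by rw [hp1]; split <;> omega
        have hinv1 : ∀ i, p1 ≤ i → (hi : i < s.length) → s[i] < (k : Int) := by
          intro i hi1 hi2
          apply hinv i _ hi2
          rw [hp1] at hi1; split at hi1 <;> omega
        obtain ⟨hq1, hq2, hq3, hq4⟩ := shrink_spec s k p1 hk hkp1 hp1n hinv1
        set q := shrinkP s k p1 with hq
        have hqn : q ≤ s.length := le_trans hq2 hp1n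
        -- s[i] ≥ k for k ≤ i < q
        have hup : ∀ i, k ≤ i → i < q → (hi : i < s.length) → (k : Int) ≤ s[i] := by
          intro i hi1 hi2 hi3
          rcases hq4 with hqk | hge
          · omega
          · have hq1' : 1 ≤ q := le_trans hk hq1
            have hqm : q - 1 < s.length := by omega
            rw [List.getD_eq_getElem s 0 hqm, not_lt] at hge
            rcases Nat.lt_or_ge i (q - 1) with hlt | hgei
            · have := (List.pairwise_iff_getElem.mp hs) i (q - 1) hi3 hqm hlt
              exact le_trans hge this
            · have : i = q - 1 := by omega
              subst this; exact hge
        -- the prefix-sum entries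
        have hP : ∀ m, m ≤ s.length → (0 :: presums 0 s).getD m 0 = (s.take m).sum := by
          intro m hm; rw [presum_getD s 0 m hm]; ring
        have hdrop : ∀ m, m ≤ s.length → (s.take m).sum + (s.drop m).sum = s.sum := by
          intro m _; rw [← List.sum_append, List.take_append_drop]
        -- both conditions are equal
        have hcond :
            ((0 :: presums 0 s).getD k 0 >
              (k : Int) * ((k : Int) - 1) + (k : Int) * ((q : Int) - (k : Int))
                + ((0 :: presums 0 s).getD s.length 0 - (0 :: presums 0 s).getD q 0))
            ↔ ((s.take k).sum >
              (s.drop k).foldl (fun r x => r + (if x < (k : Int) then x else (k : Int)))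
                ((k : Int) * ((k : Int) - 1))) := by
          rw [hP k hkn, hP s.length (le_refl _), hP q hqn,
            PySem.List.foldl_add (s.drop k) (fun x => if x < (k : Int) then x else (k : Int)),
            minsum_split s k q hq1 hqn hup hq3]
          have h1 := hdrop q hqn
          have h2 : (List.take s.length s).sum = s.sum := by rw [List.take_length]
          constructor <;> intro h <;> linarith [h1, h2]
        by_cases hc : (s.take k).sum >
            (s.drop k).foldl (fun r x => r + (if x < (k : Int) then x else (k : Int)))
              ((k : Int) * ((k : Int) - 1))
        · rw [if_pos (hcond.mpr hc), if_pos hc]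
        · rw [if_neg (fun h => hc (hcond.mp h)), if_neg hc]
          exact ih (k + 1) q (by omega) (by omega) hqn
            (fun i hi1 hi2 => lt_trans (hq3 i hi1 hi2) (by exact_mod_cast Nat.lt_succ_self k))
      · simp [hkn]

-- ===== VERDICT (by name: the statement is the Claim_ definition above) =====
theorem is_graphical_spec : Claim_equal_is_graphical := by
  intro a _
  unfold Spec_is_graphical is_graphical is_graphical_alt
  set s := PySem.List.sorted a (fun x => x) true with hsdef
  have hs : s.Pairwise (fun a b => b ≤ a) := by
    simpa using PySem.List.sorted_pairwise_rev a (fun x => x)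
  have htot : (0 :: presums 0 s).getD s.length 0 = s.sum := by
    rw [presum_getD s 0 s.length (le_refl _), List.take_length]; ring
  change (if PySem.Int.band ((0 :: presums 0 s).getD s.length 0) 1 ≠ 0 then (0 : Int)
      else loopA s (0 :: presums 0 s) s.length 1 s.length)
    = (if PySem.Int.mod s.sum 2 ≠ 0 then (0 : Int) else loopB s s.length 1)
  rw [htot, PySem.Int.band_one]
  by_cases hodd : PySem.Int.mod s.sum 2 ≠ 0
  · rw [if_pos hodd, if_pos hodd]
  · rw [if_neg hodd, if_neg hodd]
    exact loop_eq s hs (s.length + 1 - 1) 1 s.length rfl (le_refl _) (le_refl _)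
      (fun i hi1 hi2 => by omega)
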